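-- pv_equiv track=rewrite | github.com/kkr010128/codebert | problem224/problem224_34.py | func
-- ===== SOURCE A (Python) =====
-- def func(num,counter):
--     remain = num%10
--     quotient = num//10
--
--
--     if counter == 0:
--         return 1
--
--     if num<10:
--         if counter ==1:
--             return num
--         else:
--             return 0
--
--     return func(quotient,counter-1)*remain + func(quotient-1,counter-1)*(9-remain) + func(quotient,counter)
-- ===== SOURCE B (Python) =====
-- def _ndigits(n):
--     return 1 if n < 10 else 1 + _ndigits(n // 10)
--
-- def _base(n, C):
--     # table [f(n,c) for c in 0..C] for n < 10
--     return [1 if c == 0 else (n if c == 1 else 0) for c in range(C + 1)]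
--
-- def _solve(n, C):
--     # for n >= 1: returns ([f(n,c) for c 0..C], [f(n-1,c) for c 0..C])
--     if n < 10:
--         return _base(n, C), _base(n - 1, C)
--     F, G = _solve(n // 10, C)
--     d = n % 10
--     p = n // 10
--     newF = [(F[c - 1] * d + G[c - 1] * (9 - d) if c >= 1 else 0) + F[c]
--             for c in range(C + 1)]
--     if d >= 1:
--         newG = [(F[c - 1] * (d - 1) + G[c - 1] * (10 - d) if c >= 1 else 0) + F[c]
--                 for c in range(C + 1)]
--     elif p == 1:
--         newG = _base(9, C)
--     else:
--         newG = [(G[c - 1] * 9 if c >= 1 else 0) + G[c] for c in range(C + 1)]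
--     return newF, newG
--
-- def func(num, counter):
--     if counter == 0:
--         return 1
--     if num < 10:
--         return num if counter == 1 else 0
--     if counter < 0 or counter > _ndigits(num):
--         return 0
--     F, _ = _solve(num, counter)
--     return F[counter]
-- ===== Notes on version B (the rewrite author's own statement) =====
-- stated objective: faster
-- what changed: replaces A's exponential three-way recursion with a top-down DP that computes, for each decimal prefix of num, the full table of results for counters 0..counter at the prefix and at the prefix minus one (plus an early 0 when counter exceeds the digit count)
import Mathlib
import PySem

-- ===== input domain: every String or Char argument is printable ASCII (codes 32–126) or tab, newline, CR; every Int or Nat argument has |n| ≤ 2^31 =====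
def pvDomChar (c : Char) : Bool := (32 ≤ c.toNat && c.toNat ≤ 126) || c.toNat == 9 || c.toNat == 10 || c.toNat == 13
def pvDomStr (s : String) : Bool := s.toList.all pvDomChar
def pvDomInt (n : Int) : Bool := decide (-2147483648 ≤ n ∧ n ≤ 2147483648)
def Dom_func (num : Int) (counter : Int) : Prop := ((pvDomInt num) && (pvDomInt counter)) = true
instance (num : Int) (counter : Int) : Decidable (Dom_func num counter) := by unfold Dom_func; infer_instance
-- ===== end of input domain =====

-- B replaces A's exponential triple recursion by a top-down DP computing, per prefix of num,
-- the whole table of values for counters 0..C at the prefix and the prefix minus one (objective: faster).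

-- ===== PORT A =====
def func (num : Int) (counter : Int) : Int :=
  let remain := PySem.Int.mod num 10
  let quotient := PySem.Int.floordiv num 10
  if counter == 0 then 1
  else if num < 10 then (if counter == 1 then num else 0)
  else func quotient (counter - 1) * remain
       + func (quotient - 1) (counter - 1) * (9 - remain)
       + func quotient counter
termination_by num.toNat
decreasing_by
  all_goals
    simp only [PySem.Int.floordiv_eq_ediv_of_pos (by norm_num : (0:Int) < 10)] at *
    omega

-- ===== PORT B =====
def ndigitsB (n : Nat) : Nat :=
  if n < 10 then 1 else 1 + ndigitsB (n / 10)

def baseB (n : Int) (C : Nat) : List Int :=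
  (List.range (C + 1)).map (fun c => if c = 0 then 1 else if c = 1 then n else 0)

def solveB (n : Nat) (C : Nat) : List Int × List Int :=
  if n < 10 then (baseB n C, baseB ((n : Int) - 1) C)
  else
    let FG := solveB (n / 10) C
    let F := FG.1
    let G := FG.2
    let d : Int := (n % 10 : Nat)
    let p : Nat := n / 10
    let newF := (List.range (C + 1)).map (fun c =>
      (if 1 ≤ c then F.getD (c - 1) 0 * d + G.getD (c - 1) 0 * (9 - d) else 0) + F.getD c 0)
    let newG :=
      if 1 ≤ d then
        (List.range (C + 1)).map (fun c =>
          (if 1 ≤ c then F.getD (c - 1) 0 * (d - 1) + G.getD (c - 1) 0 * (10 - d) else 0) + F.getD c 0)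
      else if p = 1 then baseB 9 C
      else (List.range (C + 1)).map (fun c =>
        (if 1 ≤ c then G.getD (c - 1) 0 * 9 else 0) + G.getD c 0)
    (newF, newG)

def func_alt (num : Int) (counter : Int) : Int :=
  if counter == 0 then 1
  else if num < 10 then (if counter == 1 then num else 0)
  else if counter < 0 then 0
  else if (ndigitsB num.toNat : Int) < counter then 0
  else ((solveB num.toNat counter.toNat).1).getD counter.toNat 0

-- ===== PRECONDITION & SPEC =====
def Spec_func (num : Int) (counter : Int) (out : Int) : Prop := out = func_alt num counter
instance (num : Int) (counter : Int) (out : Int) : Decidable (Spec_func num counter out) := by unfold Spec_func; infer_instance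

-- ===== CLAIM (what is proved, stated in full; the proofs are below) =====
def Claim_equal_func : Prop := ∀ (num : Int) (counter : Int), Dom_func num counter → Spec_func num counter (func num counter)

-- ===== LEMMAS AND PROOFS =====

theorem func_zero (num : Int) : func num 0 = 1 := by
  rw [func]; simp

theorem func_small (m : Int) (c : Nat) (h : m < 10) :
    func m (c : Int) = if c = 0 then 1 else if c = 1 then m else 0 := by
  rw [func]
  simp only [beq_iff_eq, Nat.cast_eq_zero, Nat.cast_eq_one, if_pos h]

theorem func_step (p d : Int) (c : Int) (hp : 1 ≤ p) (hd0 : 0 ≤ d) (hd9 : d ≤ 9) (hc : ¬ c = 0) :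
    func (p * 10 + d) c
      = func p (c - 1) * d + func (p - 1) (c - 1) * (9 - d) + func p c := by
  rw [func]
  have hq : PySem.Int.floordiv (p * 10 + d) 10 = p := by
    rw [PySem.Int.floordiv_eq_ediv_of_pos (by norm_num : (0:Int) < 10)]; omega
  have hm : PySem.Int.mod (p * 10 + d) 10 = d := by
    rw [PySem.Int.mod_eq_emod_of_pos (by norm_num : (0:Int) < 10)]; omega
  have h10 : ¬ (p * 10 + d < 10) := by omega
  simp only [hq, hm, beq_iff_eq, hc, if_false, h10]

theorem func_neg_counter (num c : Int) (hc : c < 0) : func num c = 0 := by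
  rw [func]
  have h0 : ¬ (c = 0) := by omega
  have h1 : ¬ (c = 1) := by omega
  simp only [beq_iff_eq, h0, if_false, h1]
  split_ifs with h2
  · rfl
  · rw [func_neg_counter _ (c - 1) (by omega), func_neg_counter _ (c - 1) (by omega),
      func_neg_counter _ c hc]
    ring
termination_by num.toNat
decreasing_by
  all_goals
    simp only [PySem.Int.floordiv_eq_ediv_of_pos (by norm_num : (0:Int) < 10)] at *
    omega

theorem func_big_counter (k : Nat) (num c : Int) (h0 : 0 ≤ num) (hlt : num < 10 ^ k)
    (hk : (k : Int) < c) : func num c = 0 := by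
  rw [func]
  have hc0 : ¬ (c = 0) := by
    have : (0:Int) ≤ (k : Int) := by positivity
    omega
  simp only [beq_iff_eq, hc0, if_false]
  split_ifs with h10 h1
  · -- num < 10, c = 1 : then k = 0 so num = 0
    have hk0 : k = 0 := by omega
    subst hk0
    simp at hlt
    omega
  · rfl
  · -- num ≥ 10
    have hk2 : 2 ≤ k := by
      by_contra h
      interval_cases k <;> omega
    have hsplit : (10:Int) ^ k = 10 * 10 ^ (k - 1) := by
      rw [← pow_succ']
      congr 1
      omega
    have hq : PySem.Int.floordiv num 10 = num / 10 :=
      PySem.Int.floordiv_eq_ediv_of_pos (by norm_num)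
    have hqlt : num / 10 < 10 ^ (k - 1) := by
      rw [hsplit] at hlt; omega
    have hcast : ((k - 1 : Nat) : Int) < c - 1 := by
      push_cast [Nat.cast_sub (by omega : 1 ≤ k)]
      omega
    rw [hq, func_big_counter (k - 1) (num / 10) (c - 1) (by omega) hqlt hcast,
      func_big_counter (k - 1) (num / 10 - 1) (c - 1) (by omega) (by omega) hcast,
      func_big_counter (k - 1) (num / 10) c (by omega) hqlt (by omega)]
    ring
termination_by num.toNat
decreasing_by
  all_goals omega

theorem lt_pow_ndigitsB (n : Nat) : n < 10 ^ ndigitsB n := by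
  rw [ndigitsB]
  split_ifs with h
  · simpa using h
  · have ih := lt_pow_ndigitsB (n / 10)
    have hs : 10 ^ (1 + ndigitsB (n / 10)) = 10 * 10 ^ ndigitsB (n / 10) := by
      rw [pow_add]; ring
    omega
termination_by n
decreasing_by omega

theorem baseB_getD (m : Int) (C c : Nat) (hc : c ≤ C) :
    (baseB m C).getD c 0 = if c = 0 then 1 else if c = 1 then m else 0 := by
  rw [baseB, PySem.List.getD_map_range]
  omega

theorem solveB_invariant (n C : Nat) (hn : 1 ≤ n) (c : Nat) (hc : c ≤ C) :
    (solveB n C).1.getD c 0 = func (n : Int) (c : Int)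
      ∧ (solveB n C).2.getD c 0 = func ((n : Int) - 1) (c : Int) := by
  rw [solveB]
  split_ifs with h10
  · constructor
    · rw [baseB_getD _ _ _ hc, func_small _ _ (by exact_mod_cast h10)]
    · rw [baseB_getD _ _ _ hc, func_small _ _ (by omega)]
  · -- n ≥ 10
    have hp1 : 1 ≤ n / 10 := by omega
    have ihF := fun (c' : Nat) (hc' : c' ≤ C) => (solveB_invariant (n / 10) C hp1 c' hc').1
    have ihG := fun (c' : Nat) (hc' : c' ≤ C) => (solveB_invariant (n / 10) C hp1 c' hc').2
    simp only []
    have hd0 : (0:Int) ≤ ((n % 10 : Nat) : Int) := by positivity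
    have hd9 : ((n % 10 : Nat) : Int) ≤ 9 := by
      have : n % 10 ≤ 9 := by omega
      exact_mod_cast this
    have hpp : (1:Int) ≤ ((n / 10 : Nat) : Int) := by exact_mod_cast hp1
    have hn_eq : (n : Int) = ((n / 10 : Nat) : Int) * 10 + ((n % 10 : Nat) : Int) := by
      push_cast
      omega
    constructor
    · rw [PySem.List.getD_map_range _ _ _ _ (by omega)]
      rcases Nat.eq_zero_or_pos c with hc0 | hc1
      · subst hc0
        simp only [show ¬ (1 ≤ 0) from by omega, if_false, zero_add]
        rw [ihF 0 (by omega), Nat.cast_zero, func_zero, func_zero]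
      · have hcc : ¬ ((c : Int) = 0) := by omega
        rw [if_pos (show 1 ≤ c by omega), ihF (c - 1) (by omega), ihG (c - 1) (by omega), ihF c hc,
          hn_eq, func_step _ _ _ hpp hd0 hd9 hcc]
        have : ((c : Int)) - 1 = ((c - 1 : Nat) : Int) := by omega
        rw [this]
    · split_ifs with hd1 hp
      · -- last digit ≥ 1
        rw [PySem.List.getD_map_range _ _ _ _ (by omega)]
        have hsub : (n : Int) - 1 = ((n / 10 : Nat) : Int) * 10 + (((n % 10 : Nat) : Int) - 1) := by
          omega
        rcases Nat.eq_zero_or_pos c with hc0 | hc1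
        · subst hc0
          simp only [show ¬ (1 ≤ 0) from by omega, if_false, zero_add]
          rw [ihF 0 (by omega), Nat.cast_zero, func_zero, func_zero]
        · have hcc : ¬ ((c : Int) = 0) := by omega
          rw [if_pos (show 1 ≤ c by omega), ihF (c - 1) (by omega), ihG (c - 1) (by omega), ihF c hc,
            hsub, func_step _ _ _ hpp (by omega) (by omega) hcc]
          have h1 : ((c : Int)) - 1 = ((c - 1 : Nat) : Int) := by omega
          rw [h1]
          ring
      · -- last digit 0, prefix 1 : n = 10, n - 1 = 9
        have hn10 : n = 10 := by omega
        subst hn10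
        rw [baseB_getD _ _ _ hc]
        norm_num
        rw [func_small 9 c (by norm_num)]
      · -- last digit 0, prefix ≥ 2 : n - 1 = (p - 1) * 10 + 9
        have hd00 : n % 10 = 0 := by omega
        have hp2 : 2 ≤ n / 10 := by omega
        rw [PySem.List.getD_map_range _ _ _ _ (by omega)]
        have hsub : (n : Int) - 1 = (((n / 10 : Nat) : Int) - 1) * 10 + 9 := by
          push_cast
          omega
        rcases Nat.eq_zero_or_pos c with hc0 | hc1
        · subst hc0
          simp only [show ¬ (1 ≤ 0) from by omega, if_false, zero_add]
          rw [ihG 0 (by omega), Nat.cast_zero, func_zero, func_zero]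
        · have hcc : ¬ ((c : Int) = 0) := by omega
          rw [if_pos (show 1 ≤ c by omega), ihG (c - 1) (by omega), ihG c hc, hsub,
            func_step _ _ _ (by omega) (by norm_num) (by norm_num) hcc]
          have h1 : ((c : Int)) - 1 = ((c - 1 : Nat) : Int) := by omega
          rw [h1]
          ring
termination_by n
decreasing_by all_goals omega

-- ===== VERDICT (by name: the statement is the Claim_ definition above) =====
theorem func_spec : Claim_equal_func := by
  intro num counter _
  unfold Spec_func func_alt
  by_cases hc0 : counter = 0
  · subst hc0; simp [func_zero]
  · simp only [beq_iff_eq, hc0, if_false]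
    by_cases h10 : num < 10
    · rw [if_pos h10, func]
      simp only [beq_iff_eq, hc0, if_false, if_pos h10]
    · rw [if_neg h10]
      by_cases hcn : counter < 0
      · rw [if_pos hcn, func_neg_counter _ _ hcn]
      · rw [if_neg hcn]
        have hnum0 : 0 ≤ num := by omega
        split_ifs with hbig
        · exact func_big_counter (ndigitsB num.toNat) num counter hnum0
            (by
              have := lt_pow_ndigitsB num.toNat
              have h2 : (num.toNat : Int) < ((10:Nat) ^ ndigitsB num.toNat : Nat) := by
                exact_mod_cast this
              push_cast at h2
              omega) hbig
        · have hinv := (solveB_invariant num.toNat counter.toNat (by omega) counter.toNat le_rfl).1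
          rw [hinv]
          congr 1 <;> omega
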